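-- pv_equiv track=rewrite | github.com/yunan4nlp/NNLSTMCRF_CWS | data/Evaluate.py | get_ent
-- ===== SOURCE A (Python) =====
-- def get_ent(words):
--     start = 0
--     ents = []
--     for w in words:
--         ent_str = '[' + str(start) + ',' + str(start + len(w) - 1) + ']'
--         ents.append(ent_str)
--         start += len(w)
--     return ents
-- ===== SOURCE B (Python) =====
-- def get_ent(words):
--     end = sum(len(w) for w in words) - 1
--     ents = []
--     for w in reversed(words):
--         ents.append('[' + str(end - len(w) + 1) + ',' + str(end) + ']')
--         end -= len(w)
--     ents.reverse()
--     return ents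
-- ===== Notes on version B (the rewrite author's own statement) =====
-- stated objective: alternative
-- what changed: B traverses the words in REVERSE, maintaining an end offset that starts at total-length-1 and shrinks, emitting spans back-to-front and reversing once at the end, instead of A's forward pass threading a growing start offset.
import Mathlib
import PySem

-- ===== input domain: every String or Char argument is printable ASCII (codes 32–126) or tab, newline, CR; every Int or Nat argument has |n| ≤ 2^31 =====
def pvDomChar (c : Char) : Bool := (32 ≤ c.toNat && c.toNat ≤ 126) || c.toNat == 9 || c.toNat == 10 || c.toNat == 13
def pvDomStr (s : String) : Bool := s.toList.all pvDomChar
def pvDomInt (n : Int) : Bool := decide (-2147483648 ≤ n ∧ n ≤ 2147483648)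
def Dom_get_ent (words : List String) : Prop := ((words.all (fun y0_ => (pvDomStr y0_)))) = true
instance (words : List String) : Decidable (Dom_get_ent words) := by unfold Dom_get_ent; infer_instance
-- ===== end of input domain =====

-- B traverses the words in reverse with a shrinking end offset, building the output back-to-front; same O(n) cost (objective: alternative).

-- ===== PORT A =====
-- one forward loop threading (start, ents)
def get_ent (words : List String) : List String :=
  (words.foldl (fun (st : Int × List String) w =>
    let ent_str := "[" ++ PySem.Int.toStr st.1 ++ "," ++ PySem.Int.toStr (st.1 + PySem.Str.len w - 1) ++ "]"
    (st.1 + PySem.Str.len w, st.2 ++ [ent_str])) ((0 : Int), ([] : List String))).2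

-- ===== PORT B =====
-- total length first; then a reverse pass with a shrinking end offset; finally reverse the collected spans
def get_ent_alt (words : List String) : List String :=
  let e0 : Int := (words.foldl (fun (a : Int) w => a + PySem.Str.len w) 0) - 1
  let ents := (words.reverse.foldl (fun (st : List String × Int) w =>
      (st.1 ++ ["[" ++ PySem.Int.toStr (st.2 - PySem.Str.len w + 1) ++ "," ++ PySem.Int.toStr st.2 ++ "]"],
       st.2 - PySem.Str.len w)) (([] : List String), e0)).1
  ents.reverse

-- ===== PRECONDITION & SPEC =====
def Spec_get_ent (words : List String) (out : List String) : Prop := out = get_ent_alt words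
instance (words : List String) (out : List String) : Decidable (Spec_get_ent words out) := by unfold Spec_get_ent; infer_instance

-- ===== CLAIM =====
def Claim_equal_get_ent : Prop := ∀ (words : List String), Dom_get_ent words → Spec_get_ent words (get_ent words)

-- ===== LEMMAS AND PROOFS =====

-- common reference: the list of formatted spans starting at offset s
def pvG (s : Int) : List String → List String
  | [] => []
  | w :: ws =>
    ("[" ++ PySem.Int.toStr s ++ "," ++ PySem.Int.toStr (s + PySem.Str.len w - 1) ++ "]") :: pvG (s + PySem.Str.len w) ws

-- total length of a list of words
def pvSumL : List String → Int
  | [] => 0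
  | w :: ws => PySem.Str.len w + pvSumL ws

lemma get_ent_fold (ws : List String) : ∀ (s : Int) (acc : List String),
    (ws.foldl (fun (st : Int × List String) w =>
      let ent_str := "[" ++ PySem.Int.toStr st.1 ++ "," ++ PySem.Int.toStr (st.1 + PySem.Str.len w - 1) ++ "]"
      (st.1 + PySem.Str.len w, st.2 ++ [ent_str])) (s, acc)).2 = acc ++ pvG s ws := by
  induction ws with
  | nil => intro s acc; simp [pvG]
  | cons w ws ih =>
      intro s acc
      simp only [List.foldl_cons, pvG]
      rw [ih]
      simp

lemma sum_fold (ws : List String) : ∀ (a : Int),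
    ws.foldl (fun (a : Int) w => a + PySem.Str.len w) a = a + pvSumL ws := by
  induction ws with
  | nil => intro a; simp [pvSumL]
  | cons w ws ih => intro a; simp only [List.foldl_cons, pvSumL]; rw [ih]; ring

lemma rev_fold (ws : List String) : ∀ (s : Int) (acc : List String),
    (ws.reverse.foldl (fun (st : List String × Int) w =>
      (st.1 ++ ["[" ++ PySem.Int.toStr (st.2 - PySem.Str.len w + 1) ++ "," ++ PySem.Int.toStr st.2 ++ "]"],
       st.2 - PySem.Str.len w)) (acc, s + pvSumL ws - 1))
    = (acc ++ (pvG s ws).reverse, s - 1) := by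
  induction ws with
  | nil => intro s acc; simp [pvSumL, pvG]
  | cons w ws ih =>
      intro s acc
      simp only [List.reverse_cons, List.foldl_append, pvSumL]
      have h : s + (PySem.Str.len w + pvSumL ws) - 1
          = (s + PySem.Str.len w) + pvSumL ws - 1 := by ring
      rw [h, ih (s + PySem.Str.len w) acc]
      simp only [List.foldl_cons, List.foldl_nil, pvG, List.reverse_cons, Prod.mk.injEq]
      constructor
      · have h1 : s + PySem.Str.len w - 1 - PySem.Str.len w + 1 = s := by ring
        rw [h1]; simp
      · ring

lemma get_ent_alt_eq (ws : List String) : get_ent_alt ws = pvG 0 ws := by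
  unfold get_ent_alt
  simp only [sum_fold, rev_fold ws 0 [], List.nil_append, List.reverse_reverse]

-- ===== VERDICT =====
theorem get_ent_spec : Claim_equal_get_ent := by
  intro words _
  unfold Spec_get_ent get_ent
  rw [get_ent_fold, get_ent_alt_eq]
  simp
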